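-- pv_equiv track=rewrite | github.com/Yurchiu/nonebot-plugin-calc-game | nonebot_plugin_calc_game/__init__.py | outCUROPT
-- ===== SOURCE A (Python) =====
-- def outCUROPT(opts):
--     a = " "
--     start = 0
--     for i in opts:
--         if start == 3:
--             start = 0
--             a = a + "\n           " + i + "  "
--         else:
--             a = a + i + "  "
--         start += 1
--     return a[1:]
-- ===== SOURCE B (Python) =====
-- def outCUROPT(opts):
--     rows = ["  ".join(opts[i:i + 3]) + "  " for i in range(0, len(opts), 3)]
--     return "\n           ".join(rows)
-- ===== Notes on version B (the rewrite author's own statement) =====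
-- stated objective: faster
-- what changed: Replaces A's flat fold with a running mod-3 counter and repeated string concatenation by chunking the list into rows of three via slicing and building the result with two joins (within rows and between rows).
import Mathlib
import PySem

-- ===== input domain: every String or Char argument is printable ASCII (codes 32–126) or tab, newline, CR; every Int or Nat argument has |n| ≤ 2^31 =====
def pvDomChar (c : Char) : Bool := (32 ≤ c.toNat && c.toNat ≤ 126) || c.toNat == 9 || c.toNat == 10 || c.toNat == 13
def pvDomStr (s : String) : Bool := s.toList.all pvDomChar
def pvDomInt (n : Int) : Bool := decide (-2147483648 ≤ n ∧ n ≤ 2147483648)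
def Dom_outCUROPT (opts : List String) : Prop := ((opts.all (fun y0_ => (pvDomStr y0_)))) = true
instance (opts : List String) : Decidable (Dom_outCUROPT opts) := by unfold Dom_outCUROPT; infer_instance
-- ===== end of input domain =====

-- B formats the option list by chunking it into rows of three and joining (a join inside
-- each row and a join between rows) instead of A's single fold with a mod-3 counter.

-- ===== PORT A =====
-- the loop body of A: state is (a, start)
def pvStepA (st : String × Int) (i : String) : String × Int :=
  if st.2 == 3 then (st.1 ++ "\n           " ++ i ++ "  ", 0 + 1)
  else (st.1 ++ i ++ "  ", st.2 + 1)

def outCUROPT (opts : List String) : String :=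
  let st := opts.foldl pvStepA (" ", 0)
  PySem.Str.slice st.1 (some 1) none

-- ===== PORT B =====
-- rows = ["  ".join(opts[i:i+3]) + "  " for i in range(0, len(opts), 3)]
def pvRowsB (opts : List String) : List String :=
  (PySem.List.pyRange 0 (opts.length : Int) 3).map
    (fun i => PySem.Str.join "  " (PySem.List.slice opts (some i) (some (i + 3))) ++ "  ")

def outCUROPT_alt (opts : List String) : String :=
  PySem.Str.join "\n           " (pvRowsB opts)

-- ===== PRECONDITION & SPEC =====
def Spec_outCUROPT (opts : List String) (out : String) : Prop := out = outCUROPT_alt opts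
instance (opts : List String) (out : String) : Decidable (Spec_outCUROPT opts out) := by unfold Spec_outCUROPT; infer_instance

-- ===== CLAIM (what is proved, stated in full; the proofs are below) =====
def Claim_equal_outCUROPT : Prop := ∀ (opts : List String), Dom_outCUROPT opts → Spec_outCUROPT opts (outCUROPT opts)

-- ===== LEMMAS AND PROOFS =====

-- the characters of the whole formatted text (rows of three, "  " after each item,
-- "\n           " before every row but the first)
def pvHead : List String → List Char
  | [] => []
  | [x] => x.toList ++ "  ".toList
  | [x, y] => x.toList ++ "  ".toList ++ y.toList ++ "  ".toList
  | x :: y :: z :: r =>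
      x.toList ++ "  ".toList ++ y.toList ++ "  ".toList ++ z.toList ++ "  ".toList ++
        (if r.isEmpty then [] else "\n           ".toList ++ pvHead r)

def pvTail (opts : List String) : List Char :=
  if opts.isEmpty then [] else "\n           ".toList ++ pvHead opts

-- ---- A side ----
lemma pvFoldA3 (opts : List String) (a : String) :
    ((opts.foldl pvStepA (a, 3)).1).toList = a.toList ++ pvTail opts := by
  induction opts using pvHead.induct generalizing a with
  | case1 => simp [pvTail]
  | case2 x => simp [pvStepA, pvTail, pvHead]
  | case3 x y => simp [pvStepA, pvTail, pvHead]
  | case4 x y z r ih =>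
      simp only [List.foldl]
      norm_num [pvStepA]
      rw [ih]
      rcases r with _ | ⟨w, ws⟩ <;> simp [pvTail, pvHead]

lemma pvFoldA0 (opts : List String) (a : String) :
    ((opts.foldl pvStepA (a, 0)).1).toList = a.toList ++ pvHead opts := by
  induction opts using pvHead.induct generalizing a with
  | case1 => simp [pvHead]
  | case2 x => simp [pvStepA, pvHead]
  | case3 x y => simp [pvStepA, pvHead]
  | case4 x y z r _ =>
      simp only [List.foldl]
      norm_num [pvStepA]
      rw [pvFoldA3]
      rcases r with _ | ⟨w, ws⟩ <;> simp [pvTail, pvHead]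

lemma pvA_toList (opts : List String) : (outCUROPT opts).toList = pvHead opts := by
  unfold outCUROPT
  simp only [PySem.Str.toList_slice, PySem.Chars.slice]
  rw [show ((opts.foldl pvStepA (" ", 0)).1).toList = " ".toList ++ pvHead opts from
    pvFoldA0 opts " "]
  rw [PySem.List.slice_from_one]
  rfl

-- ---- B side ----
lemma pvRange3 (n : Nat) :
    PySem.List.pyRange 0 (n : Int) 3
      = (List.range ((n + 2) / 3)).map (fun k => ((3 * k : Nat) : Int)) := by
  rw [PySem.List.pyRange_of_pos 0 (n : Int) (show (0:Int) < 3 by norm_num)]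
  rcases Nat.eq_zero_or_pos n with h | h
  · subst h; simp
  · rw [if_pos (by exact_mod_cast h)]
    have hc : (((n : Int) - 0 + 3 - 1) / 3).toNat = (n + 2) / 3 := by omega
    rw [hc]
    apply List.map_congr_left
    intro k _
    push_cast
    ring

lemma pvSliceRow (xs : List String) (j : Nat) :
    PySem.List.slice xs (some ((3 * j : Nat) : Int)) (some (((3 * j : Nat) : Int) + 3))
      = (xs.drop (3 * j)).take 3 := by
  have h3 : ((3 * j : Nat) : Int) + 3 = ((3 * j + 3 : Nat) : Int) := by push_cast; ring
  rw [h3, PySem.List.slice_natCast]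
  congr 1
  omega

lemma pvRowsB_nil : pvRowsB [] = [] := by
  simp only [pvRowsB, List.length_nil]
  rw [pvRange3]
  simp

lemma pvRowsB_cons3 (x y z : String) (r : List String) :
    pvRowsB (x :: y :: z :: r)
      = (PySem.Str.join "  " (PySem.List.slice (x :: y :: z :: r) (some ((3*0 : Nat) : Int))
            (some (((3*0 : Nat) : Int) + 3))) ++ "  ") :: pvRowsB r := by
  simp only [pvRowsB, List.length_cons]
  have hn : r.length + 1 + 1 + 1 = r.length + 3 := by omega
  rw [hn, pvRange3, pvRange3]
  have hq : (r.length + 3 + 2) / 3 = (r.length + 2) / 3 + 1 := by omega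
  rw [hq, List.range_succ_eq_map]
  simp only [List.map_cons, List.map_map]
  congr 1
  apply List.map_congr_left
  intro j _
  simp only [Function.comp]
  rw [pvSliceRow, pvSliceRow]
  have hd : 3 * Nat.succ j = 3 * j + 1 + 1 + 1 := by omega
  rw [hd]
  simp [List.drop_succ_cons]

lemma pvRow0 (x y z : String) (r : List String) :
    (PySem.Str.join "  " (PySem.List.slice (x :: y :: z :: r) (some ((3*0 : Nat) : Int))
        (some (((3*0 : Nat) : Int) + 3))) ++ "  ").toList
      = x.toList ++ "  ".toList ++ y.toList ++ "  ".toList ++ z.toList ++ "  ".toList := by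
  rw [pvSliceRow]
  simp [PySem.Str.toList_join, PySem.Chars.join_cons_cons, PySem.Chars.join_singleton,
    List.take, List.drop]

lemma pvRowsB_ne_nil (w : String) (ws : List String) : pvRowsB (w :: ws) ≠ [] := by
  simp only [pvRowsB, List.length_cons, pvRange3]
  simp only [ne_eq, List.map_eq_nil_iff, List.range_eq_nil]
  omega

lemma pvJoin (opts : List String) :
    PySem.Chars.join "\n           ".toList ((pvRowsB opts).map String.toList)
      = pvHead opts := by
  induction opts using pvHead.induct with
  | case1 => simp [pvRowsB_nil, PySem.Chars.join_nil, pvHead]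
  | case2 x =>
      simp only [pvRowsB, List.length_cons, List.length_nil]
      rw [pvRange3]
      rw [show ((0:Nat)+1+2)/3 = 1 from by norm_num, List.range_one]
      simp only [List.map_cons, List.map_nil]
      rw [pvSliceRow]
      simp [PySem.Str.toList_join, PySem.Chars.join_singleton, List.take, pvHead]
  | case3 x y =>
      simp only [pvRowsB, List.length_cons, List.length_nil]
      rw [pvRange3]
      rw [show ((0:Nat)+1+1+2)/3 = 1 from by norm_num, List.range_one]
      simp only [List.map_cons, List.map_nil]
      rw [pvSliceRow]
      simp [PySem.Str.toList_join, PySem.Chars.join_cons_cons, PySem.Chars.join_singleton,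
        List.take, pvHead]
  | case4 x y z r ih =>
      rw [pvRowsB_cons3]
      rcases r with _ | ⟨w, ws⟩
      · rw [pvRowsB_nil]
        simp only [List.map_cons, List.map_nil, PySem.Chars.join_singleton]
        rw [pvRow0]
        simp [pvHead]
      · obtain ⟨s, t, hst⟩ := List.exists_cons_of_ne_nil (pvRowsB_ne_nil w ws)
        rw [hst] at ih ⊢
        simp only [List.map_cons]
        rw [PySem.Chars.join_cons_cons, List.append_assoc]
        rw [show (PySem.Chars.join "\n           ".toList (s.toList :: t.map String.toList))
              = pvHead (w :: ws) from by simpa using ih]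
        rw [pvRow0]
        simp [pvHead]

lemma pvB_toList (opts : List String) : (outCUROPT_alt opts).toList = pvHead opts := by
  unfold outCUROPT_alt
  rw [PySem.Str.toList_join]
  exact pvJoin opts

-- ===== VERDICT (by name: the statement is the Claim_ definition above) =====
theorem outCUROPT_spec : Claim_equal_outCUROPT := by
  intro opts _
  unfold Spec_outCUROPT
  exact String.toList_inj.mp ((pvA_toList opts).trans (pvB_toList opts).symm)
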